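-- pv_equiv track=rewrite | github.com/liseami/Dota2- | dota2_clipboard.py | normalize_hotkey
-- ===== SOURCE A (Python) =====
-- def normalize_hotkey(hotkey):
--     # 将快捷键拆分为修饰键和普通键
--     parts = hotkey.lower().split('+')
--     modifiers = []
--     others = []
--
--     # 修饰键的优先顺序
--     modifier_order = {'cmd': 0, 'ctrl': 1, 'alt': 2, 'shift': 3}
--
--     # 分类键
--     for part in parts:
--         if part in modifier_order:
--             modifiers.append(part)
--         else:
--             others.append(part)
--
--     # 对修饰键按预定义顺序排序
--     modifiers.sort(key=lambda x: modifier_order[x])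
--
--     # 组合修饰键和其他键
--     return '+'.join(modifiers + others)
-- ===== SOURCE B (Python) =====
-- def normalize_hotkey(hotkey):
--     parts = hotkey.lower().split('+')
--     priority = ['cmd', 'ctrl', 'alt', 'shift']
--     # pick modifiers by scanning parts once per priority key (keeps duplicates),
--     # then keep every non-modifier part in its original order
--     mods = [p for m in priority for p in parts if p == m]
--     others = [p for p in parts if p not in priority]
--     return '+'.join(mods + others)
-- ===== Notes on version B (the rewrite author's own statement) =====
-- stated objective: alternative
-- what changed: Replaces classify-then-stable-sort-by-priority-dict with direct selection: for each priority key in order collect the matching parts, then append the non-modifier parts; no sort and no dict.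
import Mathlib
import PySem

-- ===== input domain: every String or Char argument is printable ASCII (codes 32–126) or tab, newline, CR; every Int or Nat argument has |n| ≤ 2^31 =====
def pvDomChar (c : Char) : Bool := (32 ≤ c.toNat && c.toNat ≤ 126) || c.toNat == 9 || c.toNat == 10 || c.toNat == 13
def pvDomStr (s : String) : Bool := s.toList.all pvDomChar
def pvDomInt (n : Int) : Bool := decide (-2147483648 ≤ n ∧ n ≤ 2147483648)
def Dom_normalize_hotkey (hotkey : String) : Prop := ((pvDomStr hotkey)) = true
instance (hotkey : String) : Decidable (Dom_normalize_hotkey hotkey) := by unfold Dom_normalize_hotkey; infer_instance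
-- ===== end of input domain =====

-- B orders the modifiers by scanning the parts once per priority key instead of A's
-- classify-then-stable-sort with a priority dict; same return value (objective: alternative).

-- ===== PORT A =====
-- the dict literal `modifier_order` from A (insertion order cmd, ctrl, alt, shift)
def pvModifierOrder : PySem.Dict String Int :=
  ((((PySem.Dict.empty).insert "cmd" 0).insert "ctrl" 1).insert "alt" 2).insert "shift" 3

def normalize_hotkey (hotkey : String) : String :=
  -- '+'.split never raises: sep ≠ "", so split? is always `some`
  let parts := (PySem.Str.split? (PySem.Str.lower hotkey) "+").getD []
  -- classify each part: modifiers vs others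
  let acc := parts.foldl
    (fun (acc : List String × List String) part =>
      if pvModifierOrder.contains part then (acc.1 ++ [part], acc.2) else (acc.1, acc.2 ++ [part]))
    ([], [])
  -- modifiers.sort(key=lambda x: modifier_order[x]); every element of acc.1 is a key of
  -- the dict, so `getD … 0` IS Python's raising lookup on every reachable input (exact)
  let modifiers := PySem.List.sorted acc.1 (fun x => pvModifierOrder.getD x 0) false
  PySem.Str.join "+" (modifiers ++ acc.2)

-- ===== PORT B =====
def pvPriority : List String := ["cmd", "ctrl", "alt", "shift"]

def normalize_hotkey_alt (hotkey : String) : String :=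
  let parts := (PySem.Str.split? (PySem.Str.lower hotkey) "+").getD []
  let mods := pvPriority.flatMap (fun m => parts.filter (fun p => p == m))
  let others := parts.filter (fun p => !pvPriority.contains p)
  PySem.Str.join "+" (mods ++ others)

-- ===== PRECONDITION & SPEC =====
def Spec_normalize_hotkey (hotkey : String) (out : String) : Prop := out = normalize_hotkey_alt hotkey
instance (hotkey : String) (out : String) : Decidable (Spec_normalize_hotkey hotkey out) := by unfold Spec_normalize_hotkey; infer_instance

-- ===== CLAIM (what is proved, stated in full; the proofs are below) =====
def Claim_equal_normalize_hotkey : Prop := ∀ (hotkey : String), Dom_normalize_hotkey hotkey → Spec_normalize_hotkey hotkey (normalize_hotkey hotkey)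

-- ===== LEMMAS AND PROOFS =====

-- membership in A's dict coincides with membership in B's priority list
lemma pv_contains_eq (p : String) :
    pvModifierOrder.contains p = pvPriority.contains p := by
  simp only [pvModifierOrder, pvPriority, PySem.Dict.contains_insert, PySem.Dict.contains_empty,
    List.contains_cons, List.contains_nil]
  cases p == "cmd" <;> cases p == "ctrl" <;> cases p == "alt" <;>
    cases p == "shift" <;> simp

-- a part the dict contains is one of the four modifier names
lemma pv_mem_of_contains (p : String) (h : pvModifierOrder.contains p = true) :
    p = "cmd" ∨ p = "ctrl" ∨ p = "alt" ∨ p = "shift" := by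
  rw [pv_contains_eq] at h
  simpa [pvPriority, or_assoc] using h

-- A's classifying fold is the pair of filters
lemma pv_classify (parts : List String) (m o : List String) :
    parts.foldl
      (fun (acc : List String × List String) part =>
        if pvModifierOrder.contains part then (acc.1 ++ [part], acc.2) else (acc.1, acc.2 ++ [part]))
      (m, o)
    = (m ++ parts.filter (fun p => pvModifierOrder.contains p),
       o ++ parts.filter (fun p => !pvModifierOrder.contains p)) := by
  induction parts generalizing m o with
  | nil => simp
  | cons p ps ih =>
    by_cases h : pvModifierOrder.contains p = true
    · simp [List.foldl_cons, h, ih]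
    · simp only [Bool.not_eq_true] at h
      simp [List.foldl_cons, h, ih]

-- stable-sort output is determined: a key-sorted permutation whose equal-key elements are equal
lemma pv_sorted_unique (key : String → Int) (l₁ l₂ : List String) (h : l₁.Perm l₂)
    (s₁ : l₁.Pairwise (fun a b => key a ≤ key b)) (s₂ : l₂.Pairwise (fun a b => key a ≤ key b))
    (hloc : ∀ a ∈ l₁, ∀ b ∈ l₁, key a = key b → a = b) : l₁ = l₂ := by
  induction l₁ generalizing l₂ with
  | nil => exact (h.nil_eq).symm ▸ rfl
  | cons a t ih =>
    cases l₂ with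
    | nil => exact absurd h.symm.nil_eq (by simp)
    | cons b t₂ =>
      have hab : a = b := by
        by_contra hne
        have ha2 : a ∈ t₂ := by
          have := h.mem_iff.mp (List.mem_cons_self ..)
          simpa [hne] using this
        have hb1 : b ∈ t := by
          have := h.symm.mem_iff.mp (List.mem_cons_self ..)
          rcases List.mem_cons.mp this with h' | h'
          · exact absurd h'.symm hne
          · exact h'
        have h1 : key a ≤ key b := (List.pairwise_cons.mp s₁).1 b hb1
        have h2 : key b ≤ key a := (List.pairwise_cons.mp s₂).1 a ha2
        exact hne (hloc a (List.mem_cons_self ..) b (List.mem_cons.mpr (Or.inr hb1))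
          (le_antisymm h1 h2))
      subst hab
      have ht : t.Perm t₂ := h.cons_inv
      have := ih t₂ ht (List.pairwise_cons.mp s₁).2 (List.pairwise_cons.mp s₂).2
        (fun x hx y hy hk => hloc x (List.mem_cons.mpr (Or.inr hx)) y
          (List.mem_cons.mpr (Or.inr hy)) hk)
      rw [this]

-- counting a non-matching value in a single-value filter gives 0
lemma pv_count_filter_ne {a m : String} (h : (a == m) = false) (l : List String) :
    List.count a (l.filter (fun p => p == m)) = 0 := by
  simp [List.count_eq_zero, List.mem_filter, h]

-- the filtered modifiers are a permutation of B's per-priority selection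
lemma pv_perm (parts : List String) :
    (parts.filter (fun p => pvModifierOrder.contains p)).Perm
      (pvPriority.flatMap (fun m => parts.filter (fun p => p == m))) := by
  rw [List.perm_iff_count]
  intro a
  simp only [pvPriority, List.flatMap_cons, List.flatMap_nil, List.append_nil, List.count_append]
  by_cases h : pvModifierOrder.contains a = true
  · rcases pv_mem_of_contains a h with rfl | rfl | rfl | rfl <;>
      simp [List.count_filter h, pv_count_filter_ne]
  · simp only [Bool.not_eq_true] at h
    have : a ≠ "cmd" ∧ a ≠ "ctrl" ∧ a ≠ "alt" ∧ a ≠ "shift" := by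
      refine ⟨?_, ?_, ?_, ?_⟩ <;> rintro rfl <;> exact absurd h (by decide)
    obtain ⟨h1, h2, h3, h4⟩ := this
    simp [pv_count_filter_ne, h1, h2, h3, h4, List.count_eq_zero, List.mem_filter, h]

-- main list fact: A's sorted modifiers are exactly B's selection
lemma pv_sorted_eq (parts : List String) :
    PySem.List.sorted (parts.filter (fun p => pvModifierOrder.contains p))
      (fun x => pvModifierOrder.getD x 0) false
    = pvPriority.flatMap (fun m => parts.filter (fun p => p == m)) := by
  apply pv_sorted_unique (fun x => pvModifierOrder.getD x 0)
  · exact (PySem.List.sorted_perm ..).trans (pv_perm parts)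
  · exact PySem.List.sorted_pairwise ..
  · -- B's selection is key-sorted: block i has constant key i
    have k0 : pvModifierOrder.getD "cmd" 0 = 0 := by decide
    have k1 : pvModifierOrder.getD "ctrl" 0 = 1 := by decide
    have k2 : pvModifierOrder.getD "alt" 0 = 2 := by decide
    have k3 : pvModifierOrder.getD "shift" 0 = 3 := by decide
    simp only [pvPriority, List.flatMap_cons, List.flatMap_nil, List.append_nil, List.filter_beq]
    simp [List.pairwise_append, List.pairwise_replicate, List.mem_replicate, k0, k1, k2, k3]
    refine ⟨fun _ b hb => ?_, fun _ b hb => ?_⟩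
    · rcases hb with ⟨_, rfl⟩ | ⟨_, rfl⟩ <;> simp [k2, k3]
    · rcases hb with ⟨_, rfl⟩ | ⟨_, rfl⟩ | ⟨_, rfl⟩ <;> simp [k1, k2, k3]
  · intro a ha b hb hk
    have ha' := List.mem_filter.mp ((PySem.List.mem_sorted ..).mp ha)
    have hb' := List.mem_filter.mp ((PySem.List.mem_sorted ..).mp hb)
    rcases pv_mem_of_contains a ha'.2 with rfl | rfl | rfl | rfl <;>
      rcases pv_mem_of_contains b hb'.2 with rfl | rfl | rfl | rfl <;>
      first | rfl | (exfalso; revert hk; decide)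

-- ===== VERDICT (by name: the statement is the Claim_ definition above) =====
theorem normalize_hotkey_spec : Claim_equal_normalize_hotkey := by
  intro hotkey _
  unfold Spec_normalize_hotkey normalize_hotkey normalize_hotkey_alt
  dsimp only
  generalize (PySem.Str.split? (PySem.Str.lower hotkey) "+").getD [] = parts
  rw [pv_classify parts [] []]
  simp only [List.nil_append]
  rw [pv_sorted_eq]
  congr 2
  apply List.filter_congr
  intro p _
  rw [pv_contains_eq]
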